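-- pv_equiv track=rewrite | github.com/Themask149/Quizy2Anki | Quizy2Anki.py | trueIndices
-- ===== SOURCE A (Python) =====
-- def trueIndices(keyslist,indices):
--     ind=[]
--     for liste in indices:
--         subind=[]
--         for string in liste:
--             bool=False
--             for key in keyslist:
--                 if key.lower().startswith(string.lower()) and not bool:
--                     subind.append(key)
--                     bool=True
--             if not bool:
--                 raise("L'indice "+string+" n'existe pas")
--         ind.append(subind)
--     return ind
-- ===== SOURCE B (Python) =====
-- def trueIndices(keyslist, indices):
--     # Build once: every lowercased prefix of every key -> the first key having it.
--     table = {}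
--     for key in keyslist:
--         p = ""
--         if p not in table:
--             table[p] = key
--         for ch in key.lower():
--             p += ch
--             if p not in table:
--                 table[p] = key
--     return [[table[string.lower()] for string in liste] for liste in indices]
-- ===== Notes on version B (the rewrite author's own statement) =====
-- stated objective: faster
-- what changed: Instead of re-scanning all keys (lowercasing each) for every query string, B builds once a dict mapping every lowercased prefix of every key to the first key carrying it, so each query becomes a single dict lookup of its lowercased form.
import Mathlib
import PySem

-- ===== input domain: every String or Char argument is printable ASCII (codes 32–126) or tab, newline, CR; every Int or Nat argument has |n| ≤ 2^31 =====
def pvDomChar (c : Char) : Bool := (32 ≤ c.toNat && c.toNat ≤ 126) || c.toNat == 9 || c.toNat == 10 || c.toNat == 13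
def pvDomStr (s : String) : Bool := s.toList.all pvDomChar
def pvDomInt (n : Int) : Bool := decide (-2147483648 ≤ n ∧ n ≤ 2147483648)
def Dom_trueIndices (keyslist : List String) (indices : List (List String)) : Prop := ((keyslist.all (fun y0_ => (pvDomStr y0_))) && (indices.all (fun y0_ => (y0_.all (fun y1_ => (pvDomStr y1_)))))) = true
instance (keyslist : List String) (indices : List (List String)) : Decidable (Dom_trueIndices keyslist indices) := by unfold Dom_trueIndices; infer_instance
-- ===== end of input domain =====

-- B replaces A's per-query scan over all keys by a prefix table (all lowercased key
-- prefixes → first matching key) built once, so each query is a single dict lookup.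

-- ===== PORT A =====
def trueIndices (keyslist : List String) (indices : List (List String)) : List (List String) :=
  indices.foldl (fun ind liste =>
    let subind := liste.foldl (fun subind string =>
      (keyslist.foldl (fun (st : List String × Bool) key =>
        if PySem.Str.startswith (PySem.Str.lower key) (PySem.Str.lower string) && !st.2 then
          (st.1 ++ [key], true)
        else st) (subind, false)).1
      -- Python raises here when the flag is still False (no key matched); those inputs are outside Pre_.
      ) []
    ind ++ [subind]) []

-- ===== PORT B =====
-- Source B's `if p not in table: table[p] = key`
def tiInsertIfAbsent (t : PySem.Dict String String) (p : List Char) (key : String) : PySem.Dict String String :=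
  if t.contains (String.ofList p) then t else t.insert (String.ofList p) key

-- Source B's table-building loop: state = (current prefix p = st.1, table = st.2); 'p += ch' is st.1 ++ [ch]
def tiTable (keyslist : List String) : PySem.Dict String String :=
  keyslist.foldl (fun table key =>
    ((PySem.Str.lower key).toList.foldl
      (fun (st : List Char × PySem.Dict String String) ch =>
        (st.1 ++ [ch], tiInsertIfAbsent st.2 (st.1 ++ [ch]) key))
      ([], tiInsertIfAbsent table [] key)).2) PySem.Dict.empty

def trueIndices_alt (keyslist : List String) (indices : List (List String)) : List (List String) :=
  let table := tiTable keyslist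
  indices.map (fun liste => liste.map (fun string =>
    -- table[string.lower()]: Python raises KeyError when absent; outside Pre_ (default "" is never reached inside it)
    (table.get? (PySem.Str.lower string)).getD ""))

-- ===== PRECONDITION & SPEC =====
-- Pre_ admits exactly the inputs where A returns: every query string has some key whose
-- lowercased form starts with the query's lowercased form (otherwise A raises).
def Pre_trueIndices (keyslist : List String) (indices : List (List String)) : Prop :=
  (indices.all (fun liste => liste.all (fun string =>
     keyslist.any (fun key =>
       PySem.Str.startswith (PySem.Str.lower key) (PySem.Str.lower string))))) = true
instance (keyslist : List String) (indices : List (List String)) : Decidable (Pre_trueIndices keyslist indices) := by unfold Pre_trueIndices; infer_instance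

def pvWitness_trueIndices : List String × List (List String) :=
  (["Apple", "Banana"], [["ap", "B"], [""]])

def Spec_trueIndices (keyslist : List String) (indices : List (List String)) (out : List (List String)) : Prop := out = trueIndices_alt keyslist indices
instance (keyslist : List String) (indices : List (List String)) (out : List (List String)) : Decidable (Spec_trueIndices keyslist indices out) := by unfold Spec_trueIndices; infer_instance

-- ===== CLAIM (what is proved, stated in full; the proofs are below) =====
def Claim_equal_trueIndices : Prop := ∀ (keyslist : List String) (indices : List (List String)), Dom_trueIndices keyslist indices → Pre_trueIndices keyslist indices → Spec_trueIndices keyslist indices (trueIndices keyslist indices)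

-- ===== LEMMAS AND PROOFS =====

-- the matching predicate both programs decide, and the first matching key
def tiPred (string key : String) : Bool :=
  PySem.Str.startswith (PySem.Str.lower key) (PySem.Str.lower string)

-- A's inner flag loop: once the flag is set nothing changes
lemma aInner_true (ks : List String) (string : String) (subind : List String) :
    ks.foldl (fun (st : List String × Bool) key =>
        if PySem.Str.startswith (PySem.Str.lower key) (PySem.Str.lower string) && !st.2 then
          (st.1 ++ [key], true)
        else st) (subind, true) = (subind, true) := by
  induction ks with
  | nil => rfl
  | cons k ks ih => rw [List.foldl_cons, if_neg (by simp), ih]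

-- A's inner flag loop from a clear flag appends exactly the first matching key
lemma aInner_false (ks : List String) (string : String) (subind : List String) :
    ks.foldl (fun (st : List String × Bool) key =>
        if PySem.Str.startswith (PySem.Str.lower key) (PySem.Str.lower string) && !st.2 then
          (st.1 ++ [key], true)
        else st) (subind, false)
      = (subind ++ (ks.find? (tiPred string)).toList, (ks.find? (tiPred string)).isSome) := by
  induction ks generalizing subind with
  | nil => simp
  | cons k ks ih =>
    by_cases h : tiPred string k = true
    · rw [List.foldl_cons, if_pos (by simpa [tiPred] using h), aInner_true,
        List.find?_cons_of_pos h]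
      simp
    · rw [List.foldl_cons, if_neg (by simp [tiPred] at h; simp [h]), ih,
        List.find?_cons_of_neg h]

-- the nonempty prefixes Source B's inner loop runs through, starting from prefix p
def tiProps (p : List Char) : List Char → List (List Char)
  | [] => []
  | c :: cs => (p ++ [c]) :: tiProps (p ++ [c]) cs

lemma mem_tiProps (cs : List Char) (p x : List Char) :
    x ∈ tiProps p cs ↔ ∃ d, d ≠ [] ∧ d <+: cs ∧ x = p ++ d := by
  induction cs generalizing p with
  | nil => simp [tiProps]
  | cons c cs ih =>
    simp only [tiProps, List.mem_cons, ih]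
    constructor
    · rintro (rfl | ⟨d, hd, hpre, rfl⟩)
      · exact ⟨[c], by simp, ⟨cs, rfl⟩, rfl⟩
      · obtain ⟨t, rfl⟩ := hpre
        exact ⟨c :: d, by simp, ⟨t, by simp⟩, by simp⟩
    · rintro ⟨d, hd, hpre, rfl⟩
      match d, hd with
      | e :: d', _ =>
        obtain ⟨t, ht⟩ := hpre
        have h1 : e = c := by simpa using congrArg (fun l => l.head?) ht
        subst h1
        have h2 : d' ++ t = cs := by simpa using ht
        cases d' with
        | nil => left; simp
        | cons f d'' =>
          right
          exact ⟨f :: d'', by simp, ⟨t, h2⟩, by simp⟩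

lemma get?_tiInsertIfAbsent (t : PySem.Dict String String) (p : List Char) (key q : String) :
    (tiInsertIfAbsent t p key).get? q
      = (t.get? q).or (if q.toList = p then some key else none) := by
  unfold tiInsertIfAbsent
  by_cases hc : t.contains (String.ofList p) = true
  · rw [if_pos hc]
    by_cases hq : q.toList = p
    · have hqp : q = String.ofList p := by rw [← hq, String.ofList_toList]
      rcases ho : t.get? q with _ | v
      · exfalso
        rw [PySem.Dict.get?_eq_none_iff_contains, hqp] at ho
        simp [hc] at ho
      · simp [hq]
    · simp [hq]
  · rw [if_neg hc, PySem.Dict.get?_insert]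
    by_cases hq : q.toList = p
    · have hqp : q = String.ofList p := by rw [← hq, String.ofList_toList]
      have ho : t.get? q = none := by
        rw [PySem.Dict.get?_eq_none_iff_contains, hqp]
        simpa using hc
      rw [if_pos hqp, if_pos hq, ho, Option.none_or]
    · have hne : ¬ q = String.ofList p := fun h => hq (by rw [h, String.toList_ofList])
      simp [hne, hq]

-- Source B's inner character loop, from prefix p and table t
lemma get?_charFold (key q : String) (cs : List Char) (p : List Char)
    (t : PySem.Dict String String) :
    ((cs.foldl (fun (st : List Char × PySem.Dict String String) ch =>
        (st.1 ++ [ch], tiInsertIfAbsent st.2 (st.1 ++ [ch]) key)) (p, t)).2).get? q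
      = (t.get? q).or (if q.toList ∈ tiProps p cs then some key else none) := by
  induction cs generalizing p t with
  | nil => simp [tiProps]
  | cons c cs ih =>
    rw [List.foldl_cons]
    simp only [ih, get?_tiInsertIfAbsent, Option.or_assoc]
    congr 1
    by_cases h1 : q.toList = p ++ [c] <;>
      by_cases h2 : q.toList ∈ tiProps (p ++ [c]) cs <;>
        simp [tiProps, h1, h2]

-- one key's whole pass over the table: the key is recorded at every prefix of its lowercased form
lemma get?_perKey (key q : String) (t : PySem.Dict String String) :
    (((PySem.Str.lower key).toList.foldl
        (fun (st : List Char × PySem.Dict String String) ch =>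
          (st.1 ++ [ch], tiInsertIfAbsent st.2 (st.1 ++ [ch]) key))
        ([], tiInsertIfAbsent t [] key)).2).get? q
      = (t.get? q).or
          (if q.toList <+: (PySem.Str.lower key).toList then some key else none) := by
  rw [get?_charFold, get?_tiInsertIfAbsent, Option.or_assoc]
  congr 1
  by_cases h0 : q.toList = []
  · have hp : q.toList <+: (PySem.Str.lower key).toList := by
      rw [h0]; exact List.nil_prefix
    rw [if_pos h0, if_pos hp]
    simp
  · rw [if_neg h0, Option.none_or]
    have hm : q.toList ∈ tiProps [] (PySem.Str.lower key).toList
        ↔ q.toList <+: (PySem.Str.lower key).toList := by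
      rw [mem_tiProps]
      constructor
      · rintro ⟨d, _, hpre, hx⟩
        rw [hx]
        simpa using hpre
      · intro h
        exact ⟨q.toList, h0, h, by simp⟩
    by_cases h : q.toList <+: (PySem.Str.lower key).toList
    · rw [if_pos h, if_pos (hm.mpr h)]
    · rw [if_neg h, if_neg (fun hmem => h (hm.mp hmem))]

-- the whole table-building loop: lookup = first key whose lowercased form starts with q
lemma get?_tableFold (q : String) (ks : List String) (t : PySem.Dict String String) :
    ((ks.foldl (fun table key =>
        ((PySem.Str.lower key).toList.foldl
          (fun (st : List Char × PySem.Dict String String) ch =>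
            let p := st.1 ++ [ch]
            (p, tiInsertIfAbsent st.2 p key))
          ([], tiInsertIfAbsent table [] key)).2) t).get? q)
      = (t.get? q).or
          (ks.find? (fun key => decide (q.toList <+: (PySem.Str.lower key).toList))) := by
  induction ks generalizing t with
  | nil => simp
  | cons k ks ih =>
    rw [List.foldl_cons, ih, get?_perKey, Option.or_assoc]
    congr 1
    by_cases h : q.toList <+: (PySem.Str.lower k).toList
    · rw [if_pos h, List.find?_cons_of_pos (by simpa using h)]
      simp
    · rw [if_neg h, List.find?_cons_of_neg (by simpa using h), Option.none_or]

lemma get?_tiTable (ks : List String) (q : String) :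
    (tiTable ks).get? q
      = ks.find? (fun key => decide (q.toList <+: (PySem.Str.lower key).toList)) := by
  unfold tiTable
  rw [get?_tableFold]
  simp

-- the two programs decide the same match predicate
lemma tiPred_eq (string key : String) :
    tiPred string key
      = decide ((PySem.Str.lower string).toList <+: (PySem.Str.lower key).toList) := by
  rw [Bool.eq_iff_iff]
  simp [tiPred, PySem.Chars.startswith_iff]

-- A's row loop vs B's row map, under the per-row precondition
lemma row_eq (ks : List String) (liste : List String) (acc : List String)
    (h : ∀ string ∈ liste, (ks.find? (tiPred string)).isSome = true) :
    liste.foldl (fun subind string =>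
        (ks.foldl (fun (st : List String × Bool) key =>
          if PySem.Str.startswith (PySem.Str.lower key) (PySem.Str.lower string) && !st.2 then
            (st.1 ++ [key], true)
          else st) (subind, false)).1) acc
      = acc ++ liste.map (fun string =>
          ((tiTable ks).get? (PySem.Str.lower string)).getD "") := by
  induction liste generalizing acc with
  | nil => simp
  | cons s rest ih =>
    have hs := h s (List.mem_cons_self ..)
    rcases ho : ks.find? (tiPred s) with _ | k
    · rw [ho] at hs
      simp at hs
    have hb : (tiTable ks).get? (PySem.Str.lower s) = some k := by
      rw [get?_tiTable, ← ho]
      congr 1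
      funext key
      rw [tiPred_eq]
    rw [List.foldl_cons, aInner_false, ho,
      ih _ (fun x hx => h x (List.mem_cons_of_mem _ hx))]
    simp [hb]

-- ===== VERDICT (by name: the statement is the Claim_ definition above) =====
theorem trueIndices_spec : Claim_equal_trueIndices := by
  intro keyslist indices _hdom hpre
  unfold Spec_trueIndices trueIndices trueIndices_alt
  rw [PySem.List.foldl_append_singleton_eq_map]
  apply List.map_congr_left
  intro liste hliste
  unfold Pre_trueIndices at hpre
  simp only [List.all_eq_true, List.any_eq_true] at hpre
  apply row_eq
  intro string hstring
  obtain ⟨key, hk, hmatch⟩ := hpre liste hliste string hstring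
  rw [List.find?_isSome]
  exact ⟨key, hk, by simpa [tiPred] using hmatch⟩
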